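-- pv_equiv track=rewrite | github.com/brettalbano/projects | ErasureCoding/lib/ec_utils.py | get_diagonal_lists
-- ===== SOURCE A (Python) =====
-- def get_diagonal_lists(device_matrix):
-- 	'''
-- 	Will find the corresponding diagonals to the device matrix.
-- 	Input:
-- 	device_matrix: list(list(bool))
-- 	Output:
-- 	diagonals_list: list(list(bool))
-- 	'''
-- 	reverse_device_list = range(len(device_matrix)-1 , -1, -1)
-- 	num_words_in_device = len(device_matrix[0])
-- 	num_devices = len(device_matrix)
-- 	diagonal_list = []
-- 	for diagonal_index in range(num_devices):
-- 		temp_diag_list = []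
-- 		word_index = 0
-- 		device_index = diagonal_index
-- 		while len(temp_diag_list) < num_words_in_device:
-- 			temp_diag_list.append(device_matrix[device_index][word_index])
-- 			word_index += 1
-- 			device_index = (device_index-1) % num_devices
-- 		diagonal_list.append(temp_diag_list)
-- 	return diagonal_list
-- ===== SOURCE B (Python) =====
-- def get_diagonal_lists(device_matrix):
-- 	'''
-- 	Transpose the matrix to columns, rotate column w right by w (mod the
-- 	number of devices), then transpose back: each row is a wrapped diagonal.
-- 	'''
-- 	num_devices = len(device_matrix)
-- 	num_words_in_device = len(device_matrix[0])
-- 	columns = [[row[word] for row in device_matrix] for word in range(num_words_in_device)]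
-- 	rotated = []
-- 	for word, col in enumerate(columns):
-- 		k = word % num_devices
-- 		rotated.append(col[num_devices - k:] + col[:num_devices - k])
-- 	return [list(row) for row in zip(*rotated)]
-- ===== Notes on version B (the rewrite author's own statement) =====
-- stated objective: alternative
-- what changed: A gathers each diagonal by walking device indices with a per-element decrementing modular counter; B transposes the matrix to columns, rotates column w right by w mod num_devices using slicing, and transposes back.
-- outside the precondition, e.g. on get_diagonal_lists([[], [], []]): A returns [[], [], []], B returns []; on get_diagonal_lists([]): A raises IndexError, B raises IndexError
import Mathlib
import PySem

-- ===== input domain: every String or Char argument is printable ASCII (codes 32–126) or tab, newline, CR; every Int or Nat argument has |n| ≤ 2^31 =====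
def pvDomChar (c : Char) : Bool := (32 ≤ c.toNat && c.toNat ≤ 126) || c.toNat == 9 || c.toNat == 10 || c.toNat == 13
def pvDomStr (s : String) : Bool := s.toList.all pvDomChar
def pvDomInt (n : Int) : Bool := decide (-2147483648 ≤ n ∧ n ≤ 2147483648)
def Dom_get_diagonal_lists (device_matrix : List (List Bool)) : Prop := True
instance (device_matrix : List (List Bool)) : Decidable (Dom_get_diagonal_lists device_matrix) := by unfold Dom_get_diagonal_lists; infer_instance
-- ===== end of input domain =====

-- B replaces A's per-diagonal modular gather by transpose / rotate-each-column / transpose-back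
-- (objective: alternative decomposition; same asymptotic cost).

-- ===== PORT A =====
-- the while-loop: runs until temp has num_words_in_device elements; since temp grows
-- by exactly one per iteration, the remaining iteration count is the fuel
def pvWhileA (dm : List (List Bool)) (n : Int) (m : Nat) :
    Nat → Int → Int → List Bool → List Bool
  | 0, _, _, temp => temp
  | fuel+1, w, d, temp =>
      pvWhileA dm n m fuel (w + 1) (PySem.Int.mod (d - 1) n)
        (temp ++ [PySem.List.pyGetD (PySem.List.pyGetD dm d []) w false])

def get_diagonal_lists (device_matrix : List (List Bool)) : List (List Bool) :=
  let num_words_in_device := (PySem.List.pyGetD device_matrix 0 []).length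
  let num_devices : Int := device_matrix.length
  (PySem.List.pyRange 0 num_devices 1).foldl
    (fun diagonal_list diagonal_index =>
      diagonal_list ++ [pvWhileA device_matrix num_devices num_words_in_device
                          num_words_in_device 0 diagonal_index []])
    []

-- ===== PORT B =====
-- hand port of Python's variadic zip(*rows): truncates every row to the shortest length
def pvZipStar (rows : List (List Bool)) : List (List Bool) :=
  match rows with
  | [] => []
  | r :: rs =>
      let m := rs.foldl (fun a l => min a l.length) r.length
      (List.range m).map (fun i => (r :: rs).map (fun row => row.getD i false))

def get_diagonal_lists_alt (device_matrix : List (List Bool)) : List (List Bool) :=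
  let num_devices : Int := device_matrix.length
  let num_words_in_device := (PySem.List.pyGetD device_matrix 0 []).length
  let columns := (PySem.List.pyRange 0 (num_words_in_device : Int) 1).map
    (fun word => device_matrix.map (fun row => PySem.List.pyGetD row word false))
  let rotated := (PySem.List.enumerate columns).foldl
    (fun rotated p =>
      let k := PySem.Int.mod p.1 num_devices
      rotated ++ [PySem.List.slice p.2 (some (num_devices - k)) none ++
                  PySem.List.slice p.2 none (some (num_devices - k))])
    []
  pvZipStar rotated

-- ===== PRECONDITION & SPEC =====
-- Pre_ excludes: (a) the empty matrix and matrices with a row shorter than row 0, where A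
-- raises IndexError; (b) matrices whose rows are empty (zero words), where A returns one
-- empty list per device while B's transpose pipeline naturally collapses to [] — a
-- degenerate corner with no words, where either shape of "no diagonals" is defensible.
def Pre_get_diagonal_lists (device_matrix : List (List Bool)) : Prop :=
  device_matrix ≠ [] ∧ 0 < (device_matrix.headD []).length ∧
    ∀ row ∈ device_matrix, (device_matrix.headD []).length ≤ row.length
instance (device_matrix : List (List Bool)) : Decidable (Pre_get_diagonal_lists device_matrix) := by
  unfold Pre_get_diagonal_lists; infer_instance

def pvWitness_get_diagonal_lists : List (List Bool) :=
  [[true, false, true], [false, false, true], [true, true, false]]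

def Spec_get_diagonal_lists (device_matrix : List (List Bool)) (out : List (List Bool)) : Prop := out = get_diagonal_lists_alt device_matrix
instance (device_matrix : List (List Bool)) (out : List (List Bool)) : Decidable (Spec_get_diagonal_lists device_matrix out) := by unfold Spec_get_diagonal_lists; infer_instance

-- ===== CLAIM (what is proved, stated in full; the proofs are below) =====
def Claim_equal_get_diagonal_lists : Prop := ∀ (device_matrix : List (List Bool)), Dom_get_diagonal_lists device_matrix → Pre_get_diagonal_lists device_matrix → Spec_get_diagonal_lists device_matrix (get_diagonal_lists device_matrix)

-- ===== LEMMAS AND PROOFS =====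

-- the common element form: entry (r, w) is device_matrix[(r - w) mod n][w]
def pvEntry (dm : List (List Bool)) (n : Int) (r w : Nat) : Bool :=
  ((dm.getD (((r : Int) - (w : Int)) % n).toNat []).getD w false)

def pvSpec (dm : List (List Bool)) (n m : Nat) : List (List Bool) :=
  (List.range n).map (fun r => (List.range m).map (fun w => pvEntry dm (n : Int) r w))

theorem pvWhileA_eq (dm : List (List Bool)) (n : Int) (m : Nat) (hn : 0 < n) :
    ∀ (fuel : Nat) (w d : Int) (temp : List Bool), 0 ≤ d → d < n →
      pvWhileA dm n m fuel w d temp =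
        temp ++ (List.range fuel).map
          (fun (j : Nat) => PySem.List.pyGetD (PySem.List.pyGetD dm ((d - (j : Int)) % n) [])
                      (w + (j : Int)) false) := by
  intro fuel
  induction fuel with
  | zero => intro w d temp _ _; simp [pvWhileA]
  | succ f ih =>
    intro w d temp h0 h1
    rw [pvWhileA, ih (w + 1) (PySem.Int.mod (d - 1) n) _
        (PySem.Int.mod_nonneg _ hn) (PySem.Int.mod_lt _ hn)]
    rw [List.range_succ_eq_map, List.map_cons, List.map_map]
    simp only [Nat.cast_zero, sub_zero, add_zero, List.append_assoc, List.singleton_append]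
    rw [Int.emod_eq_of_lt h0 h1]
    congr 2
    apply List.map_congr_left
    intro j _
    have hmod : (PySem.Int.mod (d - 1) n - (j : Int)) % n
        = (d - (((j : Nat) + 1 : Nat) : Int)) % n := by
      rw [PySem.Int.mod_eq_emod_of_pos hn]
      conv_lhs => rw [Int.sub_emod]
      rw [Int.emod_emod_of_dvd _ dvd_rfl, ← Int.sub_emod]
      congr 1; push_cast; ring
    simp only [Function.comp, Nat.succ_eq_add_one, hmod]
    congr 1
    push_cast; ring

theorem portA_eq_spec (dm : List (List Bool)) (h : Pre_get_diagonal_lists dm) :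
    get_diagonal_lists dm = pvSpec dm dm.length (dm.headD []).length := by
  obtain ⟨hne, _, _⟩ := h
  have hn : 0 < (dm.length : Int) := by
    simp [List.length_pos_iff]; exact hne
  have hhd : PySem.List.pyGetD dm 0 [] = dm.headD [] := by
    cases dm with
    | nil => simp at hne
    | cons a l => simp [PySem.List.pyGetD_zero]
  unfold get_diagonal_lists pvSpec
  rw [hhd, PySem.List.foldl_append_singleton_eq_map, PySem.List.pyRange_zero_nat, List.map_map]
  simp only [List.nil_append]
  apply List.map_congr_left
  intro r hr
  rw [List.mem_range] at hr
  simp only [Function.comp]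
  rw [pvWhileA_eq dm _ _ hn _ _ _ _ (by positivity)
      (by exact_mod_cast hr)]
  simp only [List.nil_append]
  apply List.map_congr_left
  intro j _
  have hb0 : 0 ≤ ((r : Int) - (j : Int)) % (dm.length : Int) := Int.emod_nonneg _ (by omega)
  have hb1 : ((r : Int) - (j : Int)) % (dm.length : Int) < (dm.length : Int) :=
    Int.emod_lt_of_pos _ hn
  rw [PySem.List.pyGetD_eq_getElem _ _ hb0 hb1]
  simp only [zero_add, PySem.List.pyGetD_natCast]
  unfold pvEntry
  rw [List.getD_eq_getElem _ _ (by omega : (((r:Int) - (j:Int)) % (dm.length:Int)).toNat < dm.length)]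

-- foldl of min over row lengths that are all at least the seed returns the seed
theorem pvFoldlMin (l : List (List Bool)) (m : Nat) (h : ∀ x ∈ l, m ≤ x.length) :
    l.foldl (fun a x => min a x.length) m = m := by
  induction l with
  | nil => rfl
  | cons a l ih =>
    simp only [List.foldl_cons]
    rw [min_eq_left (h a List.mem_cons_self)]
    exact ih (fun x hx => h x (List.mem_cons_of_mem a hx))

theorem pvZipStar_eq (dm : List (List Bool)) (m : Nat) (hne : dm ≠ [])
    (hm : (dm.headD []).length = m) (h : ∀ row ∈ dm, m ≤ row.length) :
    pvZipStar dm = (List.range m).map (fun i => dm.map (fun row => row.getD i false)) := by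
  cases dm with
  | nil => simp at hne
  | cons r rs =>
    simp only [List.headD_cons] at hm
    show (List.range (rs.foldl (fun a l => min a l.length) r.length)).map
        (fun i => (r :: rs).map (fun row => row.getD i false)) = _
    rw [show rs.foldl (fun a l => min a l.length) r.length = m by
      rw [hm]; exact pvFoldlMin rs m (fun x hx => h x (List.mem_cons_of_mem r hx))]

theorem pvEnumFoldl (f : Nat → List Bool) (m : Nat) :
    ∀ (s : Int),
      PySem.List.enumerate ((List.range m).map f) s
        = (List.range m).map (fun (w : Nat) => ((s + (w : Int)), f w)) := by
  induction m generalizing f with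
  | zero => intro s; simp [PySem.List.enumerate_nil]
  | succ k ih =>
    intro s
    rw [List.range_succ_eq_map, List.map_cons, PySem.List.enumerate_cons, List.map_cons,
        List.map_map, List.map_map, ih (f ∘ Nat.succ) (s + 1)]
    simp only [Nat.cast_zero, add_zero, List.cons.injEq, true_and]
    apply List.map_congr_left
    intro w _
    simp only [Function.comp, Nat.succ_eq_add_one]
    congr 1
    push_cast; ring

theorem portB_eq_spec (dm : List (List Bool)) (h : Pre_get_diagonal_lists dm) :
    get_diagonal_lists_alt dm = pvSpec dm dm.length (dm.headD []).length := by
  obtain ⟨hne, hm0, hrows⟩ := h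
  set n := dm.length with hn_def
  set m := (dm.headD []).length with hm_def
  have hn : 0 < n := by cases dm with | nil => simp at hne | cons a l => simp [hn_def]
  unfold get_diagonal_lists_alt
  dsimp only
  rw [show ((PySem.List.pyRange 0 ((PySem.List.pyGetD dm 0 []).length : Int) 1).map
        (fun word => dm.map (fun row => PySem.List.pyGetD row word false)))
      = (List.range m).map (fun i => dm.map (fun row => row.getD i false)) by
    rw [PySem.List.pyRange_zero_nat, List.map_map]
    have hhd : PySem.List.pyGetD dm 0 [] = dm.headD [] := by
      cases dm with
      | nil => simp at hne
      | cons a l => simp [PySem.List.pyGetD_zero]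
    rw [hhd]
    apply List.map_congr_left
    intro w _
    simp [PySem.List.pyGetD_natCast]]
  rw [pvEnumFoldl (fun i => dm.map (fun row => row.getD i false)) m 0]
  rw [PySem.List.foldl_append_singleton_eq_map, List.nil_append, List.map_map]
  -- rewrite each rotated row into drop ++ take form
  have hrot : ((List.range m).map
        ((fun p : Int × List Bool =>
            PySem.List.slice p.2 (some ((n : Int) - PySem.Int.mod p.1 (n : Int))) none ++
            PySem.List.slice p.2 none (some ((n : Int) - PySem.Int.mod p.1 (n : Int)))) ∘
          fun (w : Nat) => ((0 : Int) + (w : Int), dm.map (fun row => row.getD w false))))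
      = (List.range m).map (fun (w : Nat) =>
          (dm.map (fun row => row.getD w false)).drop (n - w % n) ++
          (dm.map (fun row => row.getD w false)).take (n - w % n)) := by
    apply List.map_congr_left
    intro w _
    simp only [Function.comp, zero_add, PySem.Int.mod_natCast]
    have hcast : (n : Int) - ((w % n : Nat) : Int) = ((n - w % n : Nat) : Int) := by
      have : w % n < n := Nat.mod_lt _ hn
      push_cast; omega
    rw [hcast, PySem.List.slice_from_natCast, PySem.List.slice_to_natCast]
  rw [hrot]
  -- each rotated row has length n
  have hlen : ∀ w : Nat, ((dm.map (fun row => row.getD w false)).drop (n - w % n) ++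
      (dm.map (fun row => row.getD w false)).take (n - w % n)).length = n := by
    intro w
    simp only [List.length_append, List.length_drop, List.length_take, List.length_map]
    omega
  rw [pvZipStar_eq _ n (by
        cases hm : (List.range m) with
        | nil => rw [List.range_eq_nil] at hm; omega
        | cons a l => simp)
      (by
        cases hm : (List.range m) with
        | nil => rw [List.range_eq_nil] at hm; omega
        | cons a l =>
          rw [List.map_cons, List.headD_cons]
          exact hlen a)
      (by
        intro row hrmem
        rw [List.mem_map] at hrmem
        obtain ⟨w, _, rfl⟩ := hrmem
        exact le_of_eq (hlen w).symm)]
  unfold pvSpec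
  apply List.map_congr_left
  intro r hr
  rw [List.mem_range] at hr
  rw [List.map_map]
  apply List.map_congr_left
  intro w hw
  rw [List.mem_range] at hw
  simp only [Function.comp]
  have hwn : w % n < n := Nat.mod_lt _ hn
  have hlencol : (dm.map (fun row => row.getD w false)).length = n := by
    simp [hn_def]
  have hmodval : (((r : Int) - (w : Int)) % (n : Int)).toNat
      = if r < w % n then n - w % n + r else r - w % n := by
    have h1 : ((r : Int) - (w : Int)) % (n : Int)
        = ((r : Int) - ((w % n : Nat) : Int)) % (n : Int) := by
      conv_lhs => rw [Int.sub_emod]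
      conv_rhs => rw [Int.sub_emod]
      rw [Int.natCast_mod, Int.emod_emod_of_dvd _ dvd_rfl]
    by_cases hc : r < w % n
    · have h2 : ((r : Int) - ((w % n : Nat) : Int)) % (n : Int)
          = ((r : Int) - ((w % n : Nat) : Int) + (n : Int)) % (n : Int) :=
        (Int.add_emod_right _ _).symm
      rw [h1, h2, Int.emod_eq_of_lt (by push_cast; omega) (by push_cast; omega)]
      simp only [hc, if_true]
      push_cast; omega
    · rw [h1, Int.emod_eq_of_lt (by push_cast; omega) (by push_cast; omega)]
      simp only [hc, if_false]
      push_cast; omega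
  unfold pvEntry
  rw [hmodval]
  rw [List.getD_eq_getElem?_getD, List.getD_eq_getElem?_getD]
  by_cases hc : r < w % n
  · rw [if_pos hc,
        List.getElem?_append_left (by rw [List.length_drop, hlencol]; omega),
        List.getElem?_drop, List.getElem?_map,
        List.getElem?_eq_getElem (by omega : n - w % n + r < dm.length)]
    rw [List.getD_eq_getElem dm [] (by omega : n - w % n + r < dm.length)]
    simp [List.getD_eq_getElem?_getD]
  · rw [if_neg hc,
        List.getElem?_append_right (by rw [List.length_drop, hlencol]; omega)]
    rw [List.length_drop, hlencol, show r - (n - (n - w % n)) = r - w % n by omega,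
        List.getElem?_take_of_lt (by omega), List.getElem?_map,
        List.getElem?_eq_getElem (by omega : r - w % n < dm.length)]
    rw [List.getD_eq_getElem dm [] (by omega : r - w % n < dm.length)]
    simp [List.getD_eq_getElem?_getD]

-- ===== VERDICT (by name: the statement is the Claim_ definition above) =====
theorem get_diagonal_lists_spec : Claim_equal_get_diagonal_lists := by
  intro dm _ hpre
  unfold Spec_get_diagonal_lists
  rw [portA_eq_spec dm hpre, portB_eq_spec dm hpre]
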